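-- pv_equiv track=rewrite | github.com/298AusCycling/team-pursuit-api | final_forward.py | format_ss
-- ===== SOURCE A (Python) =====
-- def format_ss(ss):
--     i = 0
--     c = 0
--     f_ss = []
--     while i < len(ss):
--         if ss[i] == 1:
--             f_ss.append(c)
--             c = 1
--         else:
--             c += 1
--         i += 1
--     f_ss.append(c)
--     return f_ss
-- ===== SOURCE B (Python) =====
-- def format_ss(ss):
--     n = len(ss)
--     ones = [i for i, v in enumerate(ss) if v == 1]
--     if not ones:
--         return [n]
--     out = [ones[0]]
--     for j in range(1, len(ones)):
--         out.append(ones[j] - ones[j - 1])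
--     out.append(n - ones[-1])
--     return out
-- ===== Notes on version B (the rewrite author's own statement) =====
-- stated objective: alternative
-- what changed: Replaces A's single accumulator loop with an index-table pass: collect the positions of 1s via a comprehension, then emit first index, consecutive-index differences, and the tail length.
import Mathlib
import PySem

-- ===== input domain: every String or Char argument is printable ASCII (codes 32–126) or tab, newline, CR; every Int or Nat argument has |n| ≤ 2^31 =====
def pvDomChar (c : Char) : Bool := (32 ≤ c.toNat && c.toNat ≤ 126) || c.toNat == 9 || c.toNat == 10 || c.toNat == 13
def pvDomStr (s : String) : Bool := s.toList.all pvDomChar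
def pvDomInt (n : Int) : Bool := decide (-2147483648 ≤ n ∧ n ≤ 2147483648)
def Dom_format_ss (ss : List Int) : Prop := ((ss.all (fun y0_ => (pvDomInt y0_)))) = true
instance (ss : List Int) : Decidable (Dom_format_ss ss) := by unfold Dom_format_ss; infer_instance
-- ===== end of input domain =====

-- B rebuilds the segments from an index table of the 1-positions instead of A's accumulator loop (objective: alternative).

-- ===== PORT A =====
-- A's while-loop: state (c, f_ss); at each element append c and reset on 1, else increment c.
def formatLoopA : List Int → Int → List Int → List Int
  | [], c, acc => acc ++ [c]
  | x :: xs, c, acc => if x = 1 then formatLoopA xs 1 (acc ++ [c]) else formatLoopA xs (c + 1) acc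

def format_ss (ss : List Int) : List Int := formatLoopA ss 0 []

-- ===== PORT B =====
-- [i for i, v in enumerate(ss) if v == 1], with running index i
def onesIdx : List Int → Int → List Int
  | [], _ => []
  | x :: xs, i => if x = 1 then i :: onesIdx xs (i + 1) else onesIdx xs (i + 1)

-- the loop over range(1, len(ones)) plus the final tail append, as recursion on the rest of the index list
def tailGaps (n prev : Int) : List Int → List Int
  | [] => [n - prev]
  | c :: cs => (c - prev) :: tailGaps n c cs

def format_ss_alt (ss : List Int) : List Int :=
  let n : Int := (ss.length : Int)
  match onesIdx ss 0 with
  | [] => [n]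
  | f :: rest => f :: tailGaps n f rest

-- ===== PRECONDITION & SPEC =====
def Spec_format_ss (ss : List Int) (out : List Int) : Prop := out = format_ss_alt ss
instance (ss : List Int) (out : List Int) : Decidable (Spec_format_ss ss out) := by unfold Spec_format_ss; infer_instance

-- ===== CLAIM (what is proved, stated in full; the proofs are below) =====
def Claim_equal_format_ss : Prop := ∀ (ss : List Int), Dom_format_ss ss → Spec_format_ss ss (format_ss ss)

-- ===== LEMMAS AND PROOFS =====

-- the result of A's loop without the accumulator prefix
def segs : List Int → Int → List Int
  | [], c => [c]
  | x :: xs, c => if x = 1 then c :: segs xs 1 else segs xs (c + 1)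

theorem formatLoopA_eq_segs (ss : List Int) : ∀ (c : Int) (acc : List Int),
    formatLoopA ss c acc = acc ++ segs ss c := by
  induction ss with
  | nil => intro c acc; simp [formatLoopA, segs]
  | cons x xs ih =>
    intro c acc
    by_cases hx : x = 1
    · simp [formatLoopA, segs, hx, ih]
    · simp [formatLoopA, segs, hx, ih]

theorem segs_eq_ones (ss : List Int) : ∀ (c k : Int),
    segs ss c = match onesIdx ss k with
      | [] => [c + (ss.length : Int)]
      | f :: rest => (c + (f - k)) :: tailGaps (k + (ss.length : Int)) f rest := by
  induction ss with
  | nil => intro c k; simp [segs, onesIdx]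
  | cons x xs ih =>
    intro c k
    have harg : k + 1 + (xs.length : Int) = k + ((xs.length : Int) + 1) := by ring
    by_cases hx : x = 1
    · have ih1 := ih 1 (k + 1)
      simp only [segs, onesIdx, hx, if_true]
      cases hrec : onesIdx xs (k + 1) with
      | nil =>
        rw [ih1, hrec]
        simp only [List.length_cons, tailGaps, List.cons.injEq]
        push_cast
        and_intros <;> first | trivial | omega
      | cons f rest =>
        rw [ih1, hrec]
        simp only [List.length_cons, tailGaps, List.cons.injEq]
        push_cast
        rw [harg]
        and_intros <;> first | trivial | omega
    · have ih1 := ih (c + 1) (k + 1)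
      simp only [segs, onesIdx, hx, if_false]
      cases hrec : onesIdx xs (k + 1) with
      | nil =>
        rw [ih1, hrec]
        simp only [List.length_cons, List.cons.injEq]
        push_cast
        and_intros <;> first | trivial | omega
      | cons f rest =>
        rw [ih1, hrec]
        simp only [List.length_cons, List.cons.injEq]
        push_cast
        rw [harg]
        and_intros <;> first | trivial | omega

-- ===== VERDICT (by name: the statement is the Claim_ definition above) =====
theorem format_ss_spec : Claim_equal_format_ss := by
  intro ss _
  unfold Spec_format_ss format_ss format_ss_alt
  rw [formatLoopA_eq_segs, segs_eq_ones ss 0 0]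
  cases h : onesIdx ss 0 with
  | nil => simp
  | cons f rest => simp
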